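-- pv_equiv track=rewrite | github.com/DavidCDCB/PythonMicroProyectos | covCaldas.py | create_xlabel
-- ===== SOURCE A (Python) =====
-- def create_xlabel(fechas):
-- 	result = []
-- 	frec = 10
--
-- 	for i in range(len(fechas)):
-- 		if(i % frec == 0):
-- 			result.append(fechas[i])
-- 		else:
-- 			result.append("")
-- 	return result
-- ===== SOURCE B (Python) =====
-- def create_xlabel(fechas):
--     # chunked: emit the head of each 10-block, then blanks for the rest of the block
--     result = []
--     n = len(fechas)
--     i = 0
--     while i < n:
--         result.append(fechas[i])
--         result += [""] * (min(i + 10, n) - i - 1)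
--         i += 10
--     return result
-- ===== Notes on version B (the rewrite author's own statement) =====
-- stated objective: alternative
-- what changed: Replaces the per-index loop with a modulo test by a chunked while-loop over 10-element slices: emit the block head, pad with blanks, advance by 10; no index arithmetic or element-wise branch.
import Mathlib
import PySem

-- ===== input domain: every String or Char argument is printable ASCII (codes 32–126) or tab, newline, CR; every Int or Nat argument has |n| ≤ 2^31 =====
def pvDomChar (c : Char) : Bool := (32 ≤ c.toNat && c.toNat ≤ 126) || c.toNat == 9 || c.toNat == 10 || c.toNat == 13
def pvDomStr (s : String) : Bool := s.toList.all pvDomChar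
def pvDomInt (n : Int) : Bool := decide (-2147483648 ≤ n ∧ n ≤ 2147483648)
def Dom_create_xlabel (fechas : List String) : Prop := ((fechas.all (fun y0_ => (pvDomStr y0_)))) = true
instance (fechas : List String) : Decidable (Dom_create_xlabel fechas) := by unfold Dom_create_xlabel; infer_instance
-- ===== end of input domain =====

-- B replaces A's per-index loop with a modulo branch by a chunked while-loop over 10-element slices (alternative decomposition, same cost).

-- ===== PORT A =====
-- for i in range(len(fechas)): if i % 10 == 0: result.append(fechas[i]) else: result.append("")
-- (fechas[i] with i drawn from range(len(fechas)) is always in range, so pyGetD's default is never used)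
def create_xlabel (fechas : List String) : List String :=
  (PySem.List.pyRange 0 (PySem.List.len fechas) 1).foldl
    (fun result i =>
      if i % 10 = 0 then result ++ [PySem.List.pyGetD fechas i ""] else result ++ [""])
    []

-- ===== PORT B =====
-- while i < n: result.append(fechas[i]); result += [""] * (min(i + 10, n) - i - 1); i += 10
-- (i only takes the values 0, 10, 20, …, all nonnegative, so it is carried as a Nat)
def create_xlabel_altLoop (fechas result : List String) (i : Nat) : List String :=
  if i < fechas.length then
    create_xlabel_altLoop fechas
      (result ++ [PySem.List.pyGetD fechas (i : Int) ""]
              ++ List.replicate (min (i + 10) fechas.length - i - 1) "")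
      (i + 10)
  else result
  termination_by fechas.length - i

def create_xlabel_alt (fechas : List String) : List String :=
  create_xlabel_altLoop fechas [] 0

-- ===== PRECONDITION & SPEC =====
def Spec_create_xlabel (fechas : List String) (out : List String) : Prop := out = create_xlabel_alt fechas
instance (fechas : List String) (out : List String) : Decidable (Spec_create_xlabel fechas out) := by unfold Spec_create_xlabel; infer_instance

-- ===== CLAIM (what is proved, stated in full; the proofs are below) =====
def Claim_equal_create_xlabel : Prop := ∀ (fechas : List String), Dom_create_xlabel fechas → Spec_create_xlabel fechas (create_xlabel fechas)

-- ===== LEMMAS AND PROOFS =====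

-- common normal form: keep index k when k % 10 == 0
def pvMask (fechas : List String) : List String :=
  (List.range fechas.length).map
    (fun (k : Nat) => if ((k : Int)) % 10 = 0 then fechas.getD k "" else "")

theorem create_xlabel_eq_mask (fechas : List String) :
    create_xlabel fechas = pvMask fechas := by
  unfold create_xlabel
  rw [PySem.List.pyRange_one, List.foldl_map]
  have h1 : (List.range (PySem.List.len fechas - 0).toNat).foldl
      (fun x (y : Nat) => if ((0:Int) + y) % 10 = 0 then x ++ [PySem.List.pyGetD fechas (0 + y) ""] else x ++ [""]) []
    = (List.range (PySem.List.len fechas - 0).toNat).foldl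
      (fun x (y : Nat) => x ++ [if ((y:Int)) % 10 = 0 then fechas.getD y "" else ""]) [] := by
    apply PySem.List.foldl_congr_mem
    intro acc k _
    simp only [zero_add, PySem.List.pyGetD_natCast]
    split <;> rfl
  rw [h1, PySem.List.foldl_append_singleton_eq_map]
  simp [PySem.List.len, pvMask, List.getD]

-- the mask satisfies the 10-chunk recursion of B's loop
theorem pvMask_chunk (x : String) (r : List String) :
    pvMask (x :: r) = x :: List.replicate (min 9 r.length) "" ++ pvMask ((x :: r).drop 10) := by
  unfold pvMask
  by_cases h : (x :: r).length ≤ 10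
  · have hdrop : (x :: r).drop 10 = [] := List.drop_eq_nil_of_le h
    rw [hdrop]
    simp only [List.length_cons, List.length_nil, List.range_zero]
    have hr : r.length ≤ 9 := by simp at h; omega
    rw [List.range_succ_eq_map]
    simp only [List.map_cons, List.map_map, List.map_nil, List.append_nil]
    congr 1
    rw [min_eq_right hr]
    apply List.ext_getElem
    · simp
    · intro i h1 h2
      simp only [Function.comp, Nat.succ_eq_add_one, List.getElem_map, List.getElem_range,
        List.getElem_replicate, List.getD]
      have hi : i + 1 < 10 := by simp at h1; omega
      rw [if_neg (by push_cast; omega)]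
  · push Not at h
    have h10 : 10 ≤ (x :: r).length := by omega
    have hsplit : List.range (x :: r).length = List.range 10 ++ (List.range ((x :: r).length - 10)).map (fun y => 10 + y) := by
      have h2 := List.range_add (n := 10) (m := (x :: r).length - 10)
      rw [Nat.add_sub_cancel' h10] at h2
      exact h2
    rw [hsplit, List.map_append, List.map_map]
    have hr9 : min 9 r.length = 9 := by
      simp at h; omega
    rw [hr9]
    have hhead : (List.range 10).map
        (fun (k : Nat) => if ((k : Int)) % 10 = 0 then (x :: r).getD k "" else "")
        = x :: List.replicate 9 "" := by
      simp [List.range_succ, List.getD]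
    have htail : (List.range ((x :: r).length - 10)).map
        ((fun (k : Nat) => if ((k : Int)) % 10 = 0 then (x :: r).getD k "" else "") ∘ (fun y => 10 + y))
        = (List.range ((x :: r).drop 10).length).map
          (fun (k : Nat) => if ((k : Int)) % 10 = 0 then ((x :: r).drop 10).getD k "" else "") := by
      simp only [List.length_drop, List.length_cons]
      apply List.map_congr_left
      intro a ha
      simp only [Function.comp]
      have hm : (((10 + a : Nat)) : Int) % 10 = ((a : Nat) : Int) % 10 := by
        push_cast; omega
      have hg : (x :: r).getD (10 + a) "" = ((x :: r).drop 10).getD a "" := by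
        have h109 : 10 + a = (9 + a) + 1 := by omega
        simp [List.getD, List.getElem?_drop, h109]
      rw [hm, hg]
    rw [hhead, htail]

-- unfold equations of B's loop
theorem altLoop_pos (fechas result : List String) (i : Nat) (h : i < fechas.length) :
    create_xlabel_altLoop fechas result i =
      create_xlabel_altLoop fechas
        (result ++ [PySem.List.pyGetD fechas (i : Int) ""]
                ++ List.replicate (min (i + 10) fechas.length - i - 1) "") (i + 10) := by
  rw [create_xlabel_altLoop]
  rw [if_pos h]

theorem altLoop_neg (fechas result : List String) (i : Nat) (h : ¬ i < fechas.length) :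
    create_xlabel_altLoop fechas result i = result := by
  rw [create_xlabel_altLoop]
  rw [if_neg h]

-- the accumulator of B's loop factors out
theorem altLoop_append_aux : ∀ (fuel : Nat) (fechas : List String) (i : Nat), fechas.length - i ≤ fuel →
    ∀ result, create_xlabel_altLoop fechas result i = result ++ create_xlabel_altLoop fechas [] i := by
  intro fuel
  induction fuel with
  | zero =>
    intro fechas i hlen result
    have hge : ¬ i < fechas.length := by omega
    rw [altLoop_neg _ _ _ hge, altLoop_neg _ _ _ hge]
    simp
  | succ n ih =>
    intro fechas i hlen result
    by_cases hlt : i < fechas.length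
    · rw [altLoop_pos _ _ _ hlt, altLoop_pos _ [] _ hlt]
      have hfuel : fechas.length - (i + 10) ≤ n := by omega
      rw [ih _ _ hfuel, ih _ _ hfuel ([] ++ _ ++ _)]
      simp
    · rw [altLoop_neg _ _ _ hlt, altLoop_neg _ _ _ hlt]
      simp

theorem mask_eq_altLoop_aux : ∀ (fuel : Nat) (fechas : List String) (i : Nat), fechas.length - i ≤ fuel →
    pvMask (fechas.drop i) = create_xlabel_altLoop fechas [] i := by
  intro fuel
  induction fuel with
  | zero =>
    intro fechas i hlen
    have hge : ¬ i < fechas.length := by omega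
    rw [altLoop_neg _ _ _ hge, List.drop_eq_nil_of_le (by omega)]
    simp [pvMask]
  | succ n ih =>
    intro fechas i hlen
    by_cases hlt : i < fechas.length
    · rw [altLoop_pos _ _ _ hlt]
      have hfuel : fechas.length - (i + 10) ≤ n := by omega
      rw [altLoop_append_aux n _ _ hfuel, ← ih _ _ hfuel]
      have hcons : fechas.drop i = fechas[i] :: fechas.drop (i + 1) :=
        List.drop_eq_getElem_cons hlt
      rw [hcons, pvMask_chunk]
      have hgd : PySem.List.pyGetD fechas (i : Int) "" = fechas[i] := by
        rw [PySem.List.pyGetD_natCast, List.getD_eq_getElem _ _ hlt]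
      have hdrop10 : (fechas[i] :: fechas.drop (i + 1)).drop 10 = fechas.drop (i + 10) := by
        rw [← hcons]
        rw [List.drop_drop]
      have hblank : min 9 (fechas.drop (i + 1)).length = min (i + 10) fechas.length - i - 1 := by
        rw [List.length_drop]
        omega
      rw [hgd, hdrop10, hblank]
      simp
    · rw [altLoop_neg _ _ _ hlt, List.drop_eq_nil_of_le (by omega)]
      simp [pvMask]

-- ===== VERDICT (by name: the statement is the Claim_ definition above) =====
theorem create_xlabel_spec : Claim_equal_create_xlabel := by
  intro fechas _
  unfold Spec_create_xlabel create_xlabel_alt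
  rw [create_xlabel_eq_mask, ← mask_eq_altLoop_aux fechas.length fechas 0 (by omega),
    List.drop_zero]
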